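-- pv_equiv track=rewrite | github.com/BetterMoneyLabs/chaincash | demo/basis/circular/calculate_netting.py | optimize_settlement
-- ===== SOURCE A (Python) =====
-- from typing import Dict, List, Tuple
--
-- def optimize_settlement(positions: Dict[str, int]) -> List[Tuple[str, str, int]]:
--     """
--     Optimize settlement to minimize transactions.
--
--     Uses greedy algorithm to match debtors with creditors.
--
--     Returns:
--         List of (payer, payee, amount) for settlement
--     """
--     # Separate debtors and creditors
--     debtors = [(p, -amt) for p, amt in positions.items() if amt < 0]
--     creditors = [(p, amt) for p, amt in positions.items() if amt > 0]
--
--     # Sort by amount (largest first)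
--     debtors.sort(key=lambda x: x[1], reverse=True)
--     creditors.sort(key=lambda x: x[1], reverse=True)
--
--     settlements = []
--
--     while debtors and creditors:
--         debtor, debt_amt = debtors.pop()
--         creditor, credit_amt = creditors.pop()
--
--         # Settle minimum of debt and credit
--         amount = min(debt_amt, credit_amt)
--         settlements.append((debtor, creditor, amount))
--
--         # Put back remainder
--         if debt_amt > amount:
--             debtors.append((debtor, debt_amt - amount))
--         if credit_amt > amount:
--             creditors.append((creditor, credit_amt - amount))
--
--     return settlements
-- ===== SOURCE B (Python) =====
-- def optimize_settlement(positions):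
--     # Sort debtors and creditors descending by amount (as A does), then walk
--     # both lists from the small end with indices and scalar remaining balances
--     # instead of mutating stacks with pop/append.
--     debtors = sorted([(p, -amt) for p, amt in positions.items() if amt < 0],
--                      key=lambda x: x[1], reverse=True)[::-1]
--     creditors = sorted([(p, amt) for p, amt in positions.items() if amt > 0],
--                        key=lambda x: x[1], reverse=True)[::-1]
--     settlements = []
--     if not debtors or not creditors:
--         return settlements
--     i = j = 0
--     rd = debtors[0][1]
--     rc = creditors[0][1]
--     while True:
--         a = rd if rd < rc else rc
--         settlements.append((debtors[i][0], creditors[j][0], a))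
--         rd -= a
--         rc -= a
--         if rd == 0:
--             i += 1
--             if i == len(debtors):
--                 break
--             rd = debtors[i][1]
--         if rc == 0:
--             j += 1
--             if j == len(creditors):
--                 break
--             rc = creditors[j][1]
--     return settlements
-- ===== Notes on version B (the rewrite author's own statement) =====
-- stated objective: alternative
-- what changed: Replaces A's stack mutation (pop the smallest pair off each reverse-sorted list and append a remainder tuple back) by a two-pointer walk over the ascending lists with scalar remaining balances rd/rc that are reloaded when they hit zero, so the lists are never modified.
import Mathlib
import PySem

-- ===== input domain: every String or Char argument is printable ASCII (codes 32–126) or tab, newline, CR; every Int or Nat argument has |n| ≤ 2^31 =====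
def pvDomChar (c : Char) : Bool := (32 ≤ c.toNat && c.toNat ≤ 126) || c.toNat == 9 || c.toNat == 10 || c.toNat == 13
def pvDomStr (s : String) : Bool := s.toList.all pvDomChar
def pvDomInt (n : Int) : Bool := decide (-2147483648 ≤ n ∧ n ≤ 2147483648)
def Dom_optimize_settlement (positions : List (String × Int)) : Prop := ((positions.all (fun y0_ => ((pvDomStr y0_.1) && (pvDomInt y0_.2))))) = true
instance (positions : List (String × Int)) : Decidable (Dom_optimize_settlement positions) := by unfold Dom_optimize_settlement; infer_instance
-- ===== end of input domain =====

-- B replaces A's stack mutation (pop/append of remainder tuples) by a two-pointer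
-- walk with scalar remaining balances over the same sorted lists (alternative
-- decomposition, same asymptotic cost).


-- ===== PORT A =====
-- A's while loop: pop the last element of each list, settle min, append any
-- remainder back at the end.  list.pop() = getLast?/dropLast, append = ++ [·].
def aLoop (debtors creditors : List (String × Int))
    (settlements : List (String × String × Int)) : List (String × String × Int) :=
  match hd : debtors.getLast?, hc : creditors.getLast? with
  | some (debtor, debt_amt), some (creditor, credit_amt) =>
      let amount := min debt_amt credit_amt
      aLoop
        (if debt_amt > amount then debtors.dropLast ++ [(debtor, debt_amt - amount)] else debtors.dropLast)
        (if credit_amt > amount then creditors.dropLast ++ [(creditor, credit_amt - amount)] else creditors.dropLast)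
        (settlements ++ [(debtor, creditor, amount)])
  | _, _ => settlements
termination_by debtors.length + creditors.length
decreasing_by
  have hd' : debtors ≠ [] := by rintro rfl; simp at hd
  have hc' : creditors ≠ [] := by rintro rfl; simp at hc
  have h1 : 0 < debtors.length := List.length_pos_iff.mpr hd'
  have h2 : 0 < creditors.length := List.length_pos_iff.mpr hc'
  have hmin : ¬ (debt_amt > min debt_amt credit_amt ∧ credit_amt > min debt_amt credit_amt) := by
    rcases le_total debt_amt credit_amt with h | h <;> simp [h]
  split_ifs with hA hB hB <;> simp_all [List.length_dropLast] <;> omega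

def optimize_settlement (positions : List (String × Int)) : List (String × String × Int) :=
  let items := (PySem.Dict.ofList positions).items
  let debtors := PySem.List.sorted
    ((items.filter (fun p => decide (p.2 < 0))).map (fun p => (p.1, -p.2))) (fun x => x.2) true
  let creditors := PySem.List.sorted
    (items.filter (fun p => decide (p.2 > 0))) (fun x => x.2) true
  aLoop debtors creditors []

-- ===== PORT B =====
-- Source B's while-True loop over indices i, j with scalar remaining balances rd, rc.
-- The in-range accesses debtors[i][0] / creditors[j][0] are modelled by the
-- [i]? matches; the final 'else []' branch is unreachable (min makes rd or rc hit 0),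
-- where Python would simply iterate again.
def bLoop (debtors creditors : List (String × Int)) (i j : Nat) (rd rc : Int) :
    List (String × String × Int) :=
  match h1 : debtors[i]?, h2 : creditors[j]? with
  | some dp, some cp =>
      let a := if rd < rc then rd else rc
      let entry := (dp.1, cp.1, a)
      if hrd : rd - a = 0 then
        match h3 : debtors[i+1]? with
        | none => [entry]                       -- i+1 == len(debtors): break
        | some dp' =>
          if hrc : rc - a = 0 then
            match creditors[j+1]? with
            | none => [entry]                   -- j+1 == len(creditors): break
            | some cp' => entry :: bLoop debtors creditors (i+1) (j+1) dp'.2 cp'.2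
          else entry :: bLoop debtors creditors (i+1) j dp'.2 (rc - a)
      else
        if hrc : rc - a = 0 then
          match creditors[j+1]? with
          | none => [entry]
          | some cp' => entry :: bLoop debtors creditors i (j+1) (rd - a) cp'.2
        else []                                 -- unreachable: a = min rd rc
  | _, _ => []                                  -- unreachable under the wrapper's invariant
termination_by (debtors.length - i) + (creditors.length - j)
decreasing_by
  all_goals
    have hi : i < debtors.length := List.getElem?_eq_some_iff.mp h1 |>.1
    have hj : j < creditors.length := List.getElem?_eq_some_iff.mp h2 |>.1
  · have : i + 1 < debtors.length := List.getElem?_eq_some_iff.mp h3 |>.1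
    omega
  · have : i + 1 < debtors.length := List.getElem?_eq_some_iff.mp h3 |>.1
    omega
  · omega

def optimize_settlement_alt (positions : List (String × Int)) : List (String × String × Int) :=
  let items := (PySem.Dict.ofList positions).items
  -- sorted(..., reverse=True)[::-1]; xs[::-1] is xs.reverse (PySem.List.slice?_none_none_neg_one)
  let debtors := (PySem.List.sorted
    ((items.filter (fun p => decide (p.2 < 0))).map (fun p => (p.1, -p.2))) (fun x => x.2) true).reverse
  let creditors := (PySem.List.sorted
    (items.filter (fun p => decide (p.2 > 0))) (fun x => x.2) true).reverse
  match debtors, creditors with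
  | dp :: _, cp :: _ => bLoop debtors creditors 0 0 dp.2 cp.2
  | _, _ => []                                  -- if not debtors or not creditors: return []

-- ===== PRECONDITION & SPEC =====
def Spec_optimize_settlement (positions : List (String × Int)) (out : List (String × String × Int)) : Prop := out = optimize_settlement_alt positions
instance (positions : List (String × Int)) (out : List (String × String × Int)) : Decidable (Spec_optimize_settlement positions out) := by unfold Spec_optimize_settlement; infer_instance

-- ===== CLAIM (what is proved, stated in full; the proofs are below) =====
def Claim_equal_optimize_settlement : Prop := ∀ (positions : List (String × Int)), Dom_optimize_settlement positions → Spec_optimize_settlement positions (optimize_settlement positions)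

-- ===== LEMMAS AND PROOFS =====

-- Front-based reformulation of the greedy loop: both ports reduce to `core`.
def core : List (String × Int) → List (String × Int) → List (String × String × Int)
  | (d, da) :: ds, (c, ca) :: cs =>
      (d, c, min da ca) ::
        core (if min da ca < da then (d, da - min da ca) :: ds else ds)
             (if min da ca < ca then (c, ca - min da ca) :: cs else cs)
  | _, _ => []
termination_by ds cs => ds.length + cs.length
decreasing_by
  have : ¬ (min da ca < da ∧ min da ca < ca) := by
    rcases le_total da ca with h | h <;> simp [h]
  split_ifs with hA hB hB <;> simp <;> omega

theorem aLoop_eq_core (debtors creditors : List (String × Int))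
    (acc : List (String × String × Int)) :
    aLoop debtors creditors acc = acc ++ core debtors.reverse creditors.reverse := by
  fun_induction aLoop
  case case1 D C acc debtor da creditor ca hd hc amt ih =>
    obtain ⟨ds, rfl⟩ := List.getLast?_eq_some_iff.mp hd
    obtain ⟨cs, rfl⟩ := List.getLast?_eq_some_iff.mp hc
    simp only [dite_eq_ite] at ih
    rw [ih]
    rw [List.reverse_append, List.reverse_append]
    simp only [List.reverse_cons, List.reverse_nil, List.nil_append, List.singleton_append]
    rw [core]
    simp only [List.dropLast_concat, apply_ite (List.reverse), List.reverse_append,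
      List.reverse_cons, List.reverse_nil, List.nil_append, List.singleton_append,
      List.append_assoc]
    rfl
  case case2 D C acc h =>
    have core_nil_right : ∀ x : List (String × Int), core x [] = [] := by
      intro x; cases x <;> simp [core]
    rcases D with _ | ⟨d, ds⟩
    · simp [core]
    rcases C with _ | ⟨c, cs⟩
    · simp [core_nil_right]
    exfalso
    obtain ⟨p, hp⟩ := Option.isSome_iff_exists.mp
      (List.getLast?_isSome.mpr (List.cons_ne_nil d ds))
    obtain ⟨q, hq⟩ := Option.isSome_iff_exists.mp
      (List.getLast?_isSome.mpr (List.cons_ne_nil c cs))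
    exact h p.1 p.2 q.1 q.2 (by rw [hp]) (by rw [hq])

theorem core_nil_right (x : List (String × Int)) : core x [] = [] := by
  cases x <;> simp [core]

theorem bLoop_eq_core (L C : List (String × Int)) (i j : Nat) (rd rc : Int)
    (hi : i < L.length) (hj : j < C.length) :
    bLoop L C i j rd rc =
      core (((L[i]).1, rd) :: L.drop (i + 1)) (((C[j]).1, rc) :: C.drop (j + 1)) := by
  fun_induction bLoop with
  | case1 i j rd rc dp cp h1 h2 a entry hrd h3 =>
      have hA : a = min rd rc := by
        rcases lt_trichotomy rd rc with h' | h' | h' <;> simp [a, min_def] <;> omega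
      have hLd : L[i] = dp := (List.getElem?_eq_some_iff.mp h1).2
      have hCc : C[j] = cp := (List.getElem?_eq_some_iff.mp h2).2
    -- rd exhausted, debtors run out: both sides are [entry]
      have hdrop : List.drop (i + 1) L = [] := by
        have := List.getElem?_eq_none_iff.mp h3
        simp [List.drop_eq_nil_iff]; omega
      rw [core, hdrop]
      have : ¬ min rd rc < rd := by omega
      simp [this, core, entry, hA, hLd, hCc]
  | case2 i j rd rc dp cp h1 h2 a entry hrd dp' h3 hrc h4 =>
      have hA : a = min rd rc := by
        rcases lt_trichotomy rd rc with h' | h' | h' <;> simp [a, min_def] <;> omega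
      have hLd : L[i] = dp := (List.getElem?_eq_some_iff.mp h1).2
      have hCc : C[j] = cp := (List.getElem?_eq_some_iff.mp h2).2
      have hdrop : List.drop (j + 1) C = [] := by
        have := List.getElem?_eq_none_iff.mp h4
        simp [List.drop_eq_nil_iff]; omega
      rw [core, hdrop]
      have h5 : ¬ min rd rc < rc := by omega
      simp [h5, core_nil_right, entry, hA, hLd, hCc]
  | case3 i j rd rc dp cp h1 h2 a entry hrd dp' h3 hrc cp' h4 ih =>
      have hA : a = min rd rc := by
        rcases lt_trichotomy rd rc with h' | h' | h' <;> simp [a, min_def] <;> omega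
      have hLd : L[i] = dp := (List.getElem?_eq_some_iff.mp h1).2
      have hCc : C[j] = cp := (List.getElem?_eq_some_iff.mp h2).2
      obtain ⟨hi1, hei⟩ := List.getElem?_eq_some_iff.mp h3
      obtain ⟨hj1, hej⟩ := List.getElem?_eq_some_iff.mp h4
      rw [core]
      have h5 : ¬ min rd rc < rd := by omega
      have h6 : ¬ min rd rc < rc := by omega
      rw [ih hi1 hj1, List.drop_eq_getElem_cons hi1, List.drop_eq_getElem_cons hj1]
      simp [h5, h6, entry, hA, hei, hej, hLd, hCc]
  | case4 i j rd rc dp cp h1 h2 a entry hrd dp' h3 hrc ih =>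
      have hA : a = min rd rc := by
        rcases lt_trichotomy rd rc with h' | h' | h' <;> simp [a, min_def] <;> omega
      have hLd : L[i] = dp := (List.getElem?_eq_some_iff.mp h1).2
      have hCc : C[j] = cp := (List.getElem?_eq_some_iff.mp h2).2
      obtain ⟨hi1, hei⟩ := List.getElem?_eq_some_iff.mp h3
      rw [core]
      have h5 : ¬ min rd rc < rd := by omega
      have h6 : min rd rc < rc := by omega
      rw [ih hi1 hj, List.drop_eq_getElem_cons hi1]
      simp [h5, h6, entry, hA, hei, hLd, hCc]
  | case5 i j rd rc dp cp h1 h2 a entry hrd hrc h4 =>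
      have hA : a = min rd rc := by
        rcases lt_trichotomy rd rc with h' | h' | h' <;> simp [a, min_def] <;> omega
      have hLd : L[i] = dp := (List.getElem?_eq_some_iff.mp h1).2
      have hCc : C[j] = cp := (List.getElem?_eq_some_iff.mp h2).2
      have hdrop : List.drop (j + 1) C = [] := by
        have := List.getElem?_eq_none_iff.mp h4
        simp [List.drop_eq_nil_iff]; omega
      rw [core, hdrop]
      have h5 : min rd rc < rd := by omega
      have h6 : ¬ min rd rc < rc := by omega
      simp [h5, h6, core_nil_right, entry, hA, hLd, hCc]
  | case6 i j rd rc dp cp h1 h2 a entry hrd hrc cp' h4 ih =>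
      have hA : a = min rd rc := by
        rcases lt_trichotomy rd rc with h' | h' | h' <;> simp [a, min_def] <;> omega
      have hLd : L[i] = dp := (List.getElem?_eq_some_iff.mp h1).2
      have hCc : C[j] = cp := (List.getElem?_eq_some_iff.mp h2).2
      obtain ⟨hj1, hej⟩ := List.getElem?_eq_some_iff.mp h4
      rw [core]
      have h5 : min rd rc < rd := by omega
      have h6 : ¬ min rd rc < rc := by omega
      rw [ih hi hj1, List.drop_eq_getElem_cons hj1]
      simp [h5, h6, entry, hA, hej, hLd, hCc]
  | case7 i j rd rc dp cp h1 h2 a hrd hrc =>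
      exfalso
      have hA : a = min rd rc := by
        rcases lt_trichotomy rd rc with h' | h' | h' <;> simp [a, min_def] <;> omega
      have hLd : L[i] = dp := (List.getElem?_eq_some_iff.mp h1).2
      have hCc : C[j] = cp := (List.getElem?_eq_some_iff.mp h2).2
      omega
  | case8 i j rd rc h =>
      exfalso
      obtain ⟨dp, hdp⟩ : ∃ dp, L[i]? = some dp := ⟨L[i], List.getElem?_eq_some_iff.mpr ⟨hi, rfl⟩⟩
      obtain ⟨cp, hcp⟩ : ∃ cp, C[j]? = some cp := ⟨C[j], List.getElem?_eq_some_iff.mpr ⟨hj, rfl⟩⟩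
      exact h dp cp hdp hcp

theorem core_eq_alt_branch (D C : List (String × Int)) :
    core D C = (match D, C with
      | dp :: _, cp :: _ => bLoop D C 0 0 dp.2 cp.2
      | _, _ => []) := by
  match D, C with
  | [], _ => simp [core]
  | dp :: dt, [] => simp [core_nil_right]
  | dp :: dt, cp :: ct =>
      show core (dp :: dt) (cp :: ct) = bLoop (dp :: dt) (cp :: ct) 0 0 dp.2 cp.2
      rw [bLoop_eq_core (dp :: dt) (cp :: ct) 0 0 dp.2 cp.2 (by simp) (by simp)]
      simp

-- ===== VERDICT (by name: the statement is the Claim_ definition above) =====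
theorem optimize_settlement_spec : Claim_equal_optimize_settlement := by
  intro positions _
  show optimize_settlement positions = optimize_settlement_alt positions
  simp only [optimize_settlement, optimize_settlement_alt]
  rw [aLoop_eq_core, List.nil_append, core_eq_alt_branch]
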